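-- pv_equiv track=rewrite | github.com/ygidtu/scATS | sashimi/sashimi_overall.py | is_all_in
-- ===== SOURCE A (Python) =====
-- def is_all_in(ats, tss, distance=100):
--     ats = sorted(ats)
--     tss = sorted(tss)
--
--     match = 0
--     i, j = 0, 0
--     while i < len(ats) and j < len(tss):
--         curr_ats = ats[i]
--         curr_tss = tss[j]
--
--         if curr_ats < curr_tss - distance:
--             i += 1
--         elif curr_ats > curr_tss + distance:
--             j += 1
--         else:
--             match += 1
--             i += 1
--
--     return match == len(ats)
-- ===== SOURCE B (Python) =====
-- def is_all_in(ats, tss, distance=100):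
--     return all(any(abs(a - t) <= distance for t in tss) for a in ats)
-- ===== Notes on version B (the rewrite author's own statement) =====
-- stated objective: simpler
-- what changed: Replaces the sort-plus-synchronized-two-pointer merge with match counting by a direct one-liner: every ats element must be within distance of some tss element (all/any over the raw lists, no sorting, no counters).
import Mathlib
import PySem

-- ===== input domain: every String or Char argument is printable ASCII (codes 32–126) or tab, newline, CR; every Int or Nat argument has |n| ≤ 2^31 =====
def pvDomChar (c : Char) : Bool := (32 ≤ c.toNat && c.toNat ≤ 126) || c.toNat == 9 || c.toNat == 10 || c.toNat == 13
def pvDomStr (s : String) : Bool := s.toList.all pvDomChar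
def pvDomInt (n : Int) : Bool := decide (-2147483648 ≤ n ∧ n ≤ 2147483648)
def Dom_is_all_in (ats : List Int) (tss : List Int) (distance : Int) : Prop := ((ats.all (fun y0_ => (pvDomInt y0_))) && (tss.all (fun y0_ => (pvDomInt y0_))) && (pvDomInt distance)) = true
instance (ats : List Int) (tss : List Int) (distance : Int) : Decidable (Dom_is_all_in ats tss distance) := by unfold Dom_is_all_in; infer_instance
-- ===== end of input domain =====

-- B replaces A's sort + synchronized two-pointer merge with match counting by a direct
-- all/any scan ("every ats element is within distance of some tss element"); objective: simpler.

-- ===== PORT A =====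
-- A's while loop over indices i, j of the two sorted lists, transcribed as structural
-- recursion on the list tails (advancing i = dropping the head of the first list,
-- advancing j = dropping the head of the second); returns the final `match` counter.
def pvLoopA : List Int → List Int → Int → Nat
  | a :: as, t :: ts, d =>
    if a < t - d then pvLoopA as (t :: ts) d
    else if a > t + d then pvLoopA (a :: as) ts d
    else 1 + pvLoopA as (t :: ts) d
  | _, _, _ => 0
termination_by as ts _ => as.length + ts.length

def is_all_in (ats : List Int) (tss : List Int) (distance : Int) : Bool :=
  let sa := PySem.List.sorted ats (fun x => x) false
  let st := PySem.List.sorted tss (fun x => x) false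
  decide (pvLoopA sa st distance = sa.length)

-- ===== PORT B =====
def is_all_in_alt (ats : List Int) (tss : List Int) (distance : Int) : Bool :=
  ats.all (fun a => tss.any (fun t => decide (|a - t| ≤ distance)))

-- ===== PRECONDITION & SPEC =====
def Spec_is_all_in (ats : List Int) (tss : List Int) (distance : Int) (out : Bool) : Prop := out = is_all_in_alt ats tss distance
instance (ats : List Int) (tss : List Int) (distance : Int) (out : Bool) : Decidable (Spec_is_all_in ats tss distance out) := by unfold Spec_is_all_in; infer_instance

-- ===== CLAIM (what is proved, stated in full; the proofs are below) =====
def Claim_equal_is_all_in : Prop := ∀ (ats : List Int) (tss : List Int) (distance : Int), Dom_is_all_in ats tss distance → Spec_is_all_in ats tss distance (is_all_in ats tss distance)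

-- ===== LEMMAS AND PROOFS =====

theorem loopA_le (sa st : List Int) (d : Int) : pvLoopA sa st d ≤ sa.length := by
  induction sa, st, d using pvLoopA.induct with
  | case1 a as t ts d h ih => simpa [pvLoopA, h] using Nat.le_succ_of_le ih
  | case2 a as t ts d h h2 ih => simpa [pvLoopA, h, h2] using ih
  | case3 a as t ts d h h2 ih => simp [pvLoopA, h, h2]; omega
  | case4 => simp [pvLoopA]

theorem loopA_full (sa st : List Int) (d : Int) :
    sa.Pairwise (· ≤ ·) → st.Pairwise (· ≤ ·) →
    ((pvLoopA sa st d = sa.length) ↔ ∀ a ∈ sa, ∃ t ∈ st, t - d ≤ a ∧ a ≤ t + d) := by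
  induction sa, st, d using pvLoopA.induct with
  | case1 a as t ts d h ih =>
    intro hsa hst
    have hle := loopA_le as (t :: ts) d
    simp only [pvLoopA, if_pos h, List.length_cons]
    constructor
    · intro he; omega
    · intro hall
      rcases hall a (by simp) with ⟨t', ht', h1, _⟩
      have : t ≤ t' := by
        rcases List.mem_cons.mp ht' with rfl | hmem
        · omega
        · exact (List.pairwise_cons.mp hst).1 t' hmem
      omega
  | case2 a as t ts d h h2 ih =>
    intro hsa hst
    simp only [pvLoopA, if_neg h, if_pos h2, List.length_cons]
    have hiff : pvLoopA (a :: as) ts d = as.length + 1 ↔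
        pvLoopA (a :: as) ts d = (a :: as).length := by
      simp only [List.length_cons]
    rw [hiff, ih hsa (List.Pairwise.of_cons hst)]
    constructor
    · intro hall a' ha'
      rcases hall a' ha' with ⟨t', ht', hb⟩
      exact ⟨t', by simp [ht'], hb⟩
    · intro hall a' ha'
      rcases hall a' ha' with ⟨t', ht', hb1, hb2⟩
      have haa' : a ≤ a' := by
        rcases List.mem_cons.mp ha' with rfl | hmem
        · omega
        · exact (List.pairwise_cons.mp hsa).1 a' hmem
      rcases List.mem_cons.mp ht' with rfl | hmem
      · omega
      · exact ⟨t', hmem, hb1, hb2⟩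
  | case3 a as t ts d h h2 ih =>
    intro hsa hst
    simp only [pvLoopA, if_neg h, if_neg h2, List.length_cons]
    have hiff : 1 + pvLoopA as (t :: ts) d = as.length + 1 ↔
        pvLoopA as (t :: ts) d = as.length := by omega
    rw [hiff, ih (List.Pairwise.of_cons hsa) hst]
    constructor
    · intro hall a' ha'
      rcases List.mem_cons.mp ha' with rfl | hmem
      · exact ⟨t, by simp, by omega, by omega⟩
      · exact hall a' hmem
    · intro hall a' ha'
      exact hall a' (by simp [ha'])
  | case4 x y d h =>
    intro _ _
    cases x with
    | nil => simp [pvLoopA]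
    | cons a as =>
      cases y with
      | cons t ts => exact (h a as t ts rfl rfl).elim
      | nil =>
        simp only [pvLoopA, List.length_cons]
        constructor
        · intro he; omega
        · intro hall
          rcases hall a (by simp) with ⟨t, ht, _⟩
          simp at ht

-- ===== VERDICT (by name: the statement is the Claim_ definition above) =====
theorem is_all_in_spec : Claim_equal_is_all_in := by
  intro ats tss d _
  unfold Spec_is_all_in is_all_in is_all_in_alt
  rw [Bool.eq_iff_iff]
  rw [decide_eq_true_iff]
  rw [loopA_full _ _ _ (PySem.List.sorted_pairwise ats (fun x => x) )
      (PySem.List.sorted_pairwise tss (fun x => x))]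
  simp only [List.all_eq_true, List.any_eq_true, decide_eq_true_iff,
    PySem.List.mem_sorted, abs_le]
  constructor
  · intro hall a ha
    rcases hall a ha with ⟨t, ht, h1, h2⟩
    exact ⟨t, ht, by omega, by omega⟩
  · intro hall a ha
    rcases hall a ha with ⟨t, ht, h1, h2⟩
    exact ⟨t, ht, by omega, by omega⟩
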